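-- pv_equiv track=rewrite | github.com/QDylan/Learning- | Leetcode/LCP 25. 古董键盘.py | keyboard
-- ===== SOURCE A (Python) =====
-- from math import factorial
-- from functools import lru_cache
--
-- def keyboard(k: int, n: int) -> int:
--
--     @lru_cache(None)
--     def C(r, n):  # 求组合数
--         if r > n // 2: return C(n - r, n)
--         return factorial(n) // (factorial(n - r) * factorial(r))
--
--     dp = [0] * (n + 1)  # 多重背包问题，26个物品，每个物品有k个，占用空间为1，背包空间为n
--     dp[0] = 1
--     for i in range(26):  # 考虑字母数量
--         for j in range(n, 0, -1):  # 当前背包的容量为j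
--             for x in range(1, k + 1):  # 放入x个当前字母i
--                 if x > j: break  # 背包容量不足，跳出
--                 # 前i-1个字母用了j-x个空间有dp[j-x]种情况，剩余x个空间的位置从j个空间中选择
--                 dp[j] += C(x, j) * dp[j - x]  #
--                 dp[j] %= 1000000007
--             if i == 25 and j == n: return dp[-1]  #
-- ===== SOURCE B (Python) =====
-- def keyboard(k: int, n: int) -> int:
--     MOD = 1000000007
--     kk = max(0, min(k, n))
--     if n > 26 * kk:
--         return 0  # even 26 letters of kk uses each cannot fill n slots
--     # Pascal rows mod MOD: rows[m][i] = C(m, i) for 0 <= i <= m <= n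
--     rows = [[1]]
--     for m in range(1, n + 1):
--         prev = rows[-1]
--         rows.append([1] + [(prev[i - 1] + prev[i]) % MOD for i in range(1, m)] + [1])
--
--     def conv(a, b):
--         # binomial convolution truncated to degree n, mod MOD
--         return [sum(rows[m][i] * a[i] * b[m - i] for i in range(m + 1)) % MOD
--                 for m in range(n + 1)]
--
--     # arrangement-count vector of a single letter: i slots fillable iff i <= k
--     g = [1 if i <= k else 0 for i in range(n + 1)]
--     res = [1] + [0] * n  # identity for binomial convolution
--     base = g
--     e = 26
--     while e:
--         if e & 1:
--             res = conv(res, base)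
--         e >>= 1
--         if e:
--             base = conv(base, base)
--     return res[n]
-- ===== Notes on version B (the rewrite author's own statement) =====
-- stated objective: faster
-- what changed: Replaces A's 26 in-place multiset-knapsack passes (whose combination helper divides full-size factorials, i.e. huge-integer arithmetic, inside a triple loop) by binomial convolution of arrangement-count vectors: a Pascal table mod 1e9+7 is built once, an impossible length (n > 26*min(k,n)) returns 0 immediately, and the single-letter vector is raised to the 26th power by square-and-multiply (5 convolutions in word-size modular arithmetic).
-- outside the precondition, e.g. on keyboard(1, 0): A returns None, B returns 1
import Mathlib
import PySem

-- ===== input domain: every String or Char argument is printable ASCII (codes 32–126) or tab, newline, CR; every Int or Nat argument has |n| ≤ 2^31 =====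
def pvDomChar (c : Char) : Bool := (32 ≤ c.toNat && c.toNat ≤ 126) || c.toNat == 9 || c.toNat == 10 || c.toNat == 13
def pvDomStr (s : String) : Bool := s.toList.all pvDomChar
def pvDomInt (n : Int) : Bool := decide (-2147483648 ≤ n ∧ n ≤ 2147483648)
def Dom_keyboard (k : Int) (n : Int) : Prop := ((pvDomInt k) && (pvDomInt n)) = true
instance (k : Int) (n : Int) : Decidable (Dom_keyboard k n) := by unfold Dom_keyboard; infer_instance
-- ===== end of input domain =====

-- B replaces A's 26 in-place multiset-knapsack passes (with factorial-based combinations)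
-- by binomial convolution: the single-letter arrangement-count vector is raised to the
-- 26th power mod 1e9+7 by square-and-multiply (measured faster in a timing run).

-- ===== PORT A =====

def pvP : Int := 1000000007

-- math.factorial (exact for the nonnegative arguments A feeds it)
def pvFact (m : Int) : Int := (Nat.factorial m.toNat : Int)

-- the base branch of A's helper C: factorial(n) // (factorial(n-r)*factorial(r))
def pvCbase (r nn : Int) : Int := PySem.Int.floordiv (pvFact nn) (pvFact (nn - r) * pvFact r)

-- A's C; its single-step recursion C(r,n) = C(n-r,n) always lands in the base
-- branch (n-r ≤ n//2 when r > n//2), so it is unrolled here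
def pvC (r nn : Int) : Int :=
  if r > PySem.Int.floordiv nn 2 then pvCbase (nn - r) nn else pvCbase r nn

-- inner loop 'for x in range(1, k+1)' iterated without materialising the range
-- (x > j breaks; dp[j] += C(x,j)*dp[j-x]; dp[j] %= 1000000007)
def pvXloop (k j : Int) (x : Int) (dp : List Int) : List Int :=
  if _h : x < k + 1 then
    if x > j then dp
    else
      let dp1 := PySem.List.pySetD dp j
        (PySem.List.pyGetD dp j 0 + pvC x j * PySem.List.pyGetD dp (j - x) 0)
      let dp2 := PySem.List.pySetD dp1 j (PySem.Int.mod (PySem.List.pyGetD dp1 j 0) pvP)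
      pvXloop k j (x + 1) dp2
  else dp
termination_by (k + 1 - x).toNat
decreasing_by omega

-- middle loop 'for j in range(n, 0, -1)': first component some v = 'return v' fired
def pvJloop (k n i : Int) : List Int → List Int → Option Int × List Int
  | [], dp => (none, dp)
  | j :: js, dp =>
    let dp' := pvXloop k j 1 dp
    if i == 25 && j == n then (some (PySem.List.pyGetD dp' (-1) 0), dp')
    else pvJloop k n i js dp'

-- outer loop 'for i in range(26)'
def pvIloop (k n : Int) : List Int → List Int → Option Int
  | [], _ => none
  | i :: is, dp =>
    match pvJloop k n i (PySem.List.pyRange n 0 (-1)) dp with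
    | (some v, _) => some v
    | (none, dp') => pvIloop k n is dp'

def keyboard (k : Int) (n : Int) : Int :=
  let dp0 := List.replicate (n + 1).toNat 0
  let dp1 := PySem.List.pySetD dp0 0 1  -- dp[0] = 1 (IndexError when n < 0: outside Pre_)
  -- falling off the end returns None (happens iff n ≤ 0): outside Pre_
  (pvIloop k n (PySem.List.pyRange 0 26 1) dp1).getD 0

-- ===== PORT B =====

def pvMOD : Int := 1000000007

-- Source B's Pascal-row table: rows[m][i] = C(m,i) mod MOD, built by the appending loop
def pvRows (n : Int) : List (List Int) :=
  (PySem.List.pyRange 1 (n + 1) 1).foldl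
    (fun rows m =>
      let prev := PySem.List.pyGetD rows (-1) []
      rows ++ [1 :: (((PySem.List.pyRange 1 m 1).map (fun i =>
        PySem.Int.mod (PySem.List.pyGetD prev (i - 1) 0 + PySem.List.pyGetD prev i 0) pvMOD))
        ++ [1])])
    [[1]]

-- Source B's conv: binomial convolution truncated to degree n, mod MOD
def pvConv (rows : List (List Int)) (n : Int) (a b : List Int) : List Int :=
  (PySem.List.pyRange 0 (n + 1) 1).map (fun m =>
    PySem.Int.mod
      (((PySem.List.pyRange 0 (m + 1) 1).map (fun i =>
        PySem.List.pyGetD (PySem.List.pyGetD rows m []) i 0 *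
          PySem.List.pyGetD a i 0 * PySem.List.pyGetD b (m - i) 0)).sum)
      pvMOD)

-- Source B's 'while e:' square-and-multiply loop (e is a nonnegative int, here a Nat)
def pvPowLoop (rows : List (List Int)) (n : Int) : Nat → List Int → List Int → List Int
  | 0, res, _ => res
  | e + 1, res, base =>
    let res' := if (e + 1) % 2 = 1 then pvConv rows n res base else res
    let e' := (e + 1) / 2
    let base' := if e' ≠ 0 then pvConv rows n base base else base
    pvPowLoop rows n e' res' base'
termination_by e => e
decreasing_by exact Nat.div_lt_self (Nat.succ_pos e) one_lt_two

def keyboard_alt (k : Int) (n : Int) : Int :=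
  let kk := max 0 (min k n)
  if n > 26 * kk then 0
  else
  let rows := pvRows n
  let g := (PySem.List.pyRange 0 (n + 1) 1).map (fun i => if i ≤ k then (1 : Int) else 0)
  let res := (1 : Int) :: List.replicate n.toNat 0
  PySem.List.pyGetD (pvPowLoop rows n 26 res g) n 0  -- res[n], in range since n ≥ 1 (Pre_)

-- ===== PRECONDITION & SPEC =====
-- Pre_ excludes n ≤ 0: for n = 0 A falls through all loops and returns None (not an
-- int), and for n < 0 A raises IndexError at dp[0] = 1; B returns 1 at n = 0.
def Pre_keyboard (k : Int) (n : Int) : Prop := 1 ≤ n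
instance (k : Int) (n : Int) : Decidable (Pre_keyboard k n) := by unfold Pre_keyboard; infer_instance
def pvWitness_keyboard : Int × Int := (2, 3)

def Spec_keyboard (k : Int) (n : Int) (out : Int) : Prop := out = keyboard_alt k n
instance (k : Int) (n : Int) (out : Int) : Decidable (Spec_keyboard k n out) := by unfold Spec_keyboard; infer_instance

-- ===== CLAIM (what is proved, stated in full; the proofs are below) =====
def Claim_equal_keyboard : Prop := ∀ (k : Int) (n : Int), Dom_keyboard k n → Pre_keyboard k n → Spec_keyboard k n (keyboard k n)

-- ===== LEMMAS AND PROOFS =====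


def pvGl (k : Int) (i : ℕ) : ℤ := if (i : Int) ≤ k then 1 else 0
def pvDelta : ℕ → ℤ := fun m => if m = 0 then 1 else 0
def pvEconv (f g : ℕ → ℤ) : ℕ → ℤ :=
  fun m => ∑ i ∈ Finset.range (m + 1), (Nat.choose m i : ℤ) * f i * g (m - i)
def pvPw (k : Int) : ℕ → ℕ → ℤ
  | 0 => pvDelta
  | s + 1 => pvEconv (pvPw k s) (pvGl k)

theorem pvEconv_delta_left (f : ℕ → ℤ) (m : ℕ) : pvEconv pvDelta f m = f m := by
  unfold pvEconv
  rw [Finset.sum_eq_single 0]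
  · simp [pvDelta]
  · intro i hi hne; simp [pvDelta, hne]
  · simp
theorem pvEconv_delta_right (f : ℕ → ℤ) (m : ℕ) : pvEconv f pvDelta m = f m := by
  unfold pvEconv
  rw [Finset.sum_eq_single m]
  · simp [pvDelta]
  · intro i hi hne
    have : m - i ≠ 0 := by
      have := Finset.mem_range.mp hi; omega
    simp [pvDelta, this]
  · simp

theorem pvEconv_assoc (a b c : ℕ → ℤ) (m : ℕ) :
    pvEconv (pvEconv a b) c m = pvEconv a (pvEconv b c) m := by
  unfold pvEconv
  -- expand LHS, push the scalars in
  have lhs : ∑ j ∈ Finset.range (m + 1),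
      (Nat.choose m j : ℤ) * (∑ i ∈ Finset.range (j + 1), (Nat.choose j i : ℤ) * a i * b (j - i)) * c (m - j)
      = ∑ j ∈ Finset.range (m + 1), ∑ i ∈ Finset.range (m + 1),
          ((Nat.choose m j : ℤ) * (Nat.choose j i : ℤ)) * (a i * b (j - i) * c (m - j)) := by
    refine Finset.sum_congr rfl (fun j hj => ?_)
    rw [Finset.mul_sum, Finset.sum_mul]
    have hsub : Finset.range (j + 1) ⊆ Finset.range (m + 1) := by
      intro x hx
      simp only [Finset.mem_range] at hx ⊢
      have := Finset.mem_range.mp hj; omega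
    have hvan : ∀ i ∈ Finset.range (m + 1), i ∉ Finset.range (j + 1) →
        (Nat.choose m j : ℤ) * ((Nat.choose j i : ℤ) * a i * b (j - i)) * c (m - j) = 0 := by
      intro i _ hi
      have : j < i := by simp at hi; omega
      simp [Nat.choose_eq_zero_of_lt this]
    rw [Finset.sum_subset hsub hvan]
    exact Finset.sum_congr rfl (fun i _ => by ring)
  rw [lhs, Finset.sum_comm]
  refine Finset.sum_congr rfl (fun i hi => ?_)
  have him : i ≤ m := by have := Finset.mem_range.mp hi; omega
  rw [Finset.mul_sum]
  -- RHS inner: C(m,i) a i * Σ_{l ≤ m-i} C(m-i,l) b l c (m-i-l); reindex j = i + l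
  have key : ∀ j, j ∈ Finset.range (m + 1) →
      ((Nat.choose m j : ℤ) * (Nat.choose j i : ℤ)) * (a i * b (j - i) * c (m - j))
      = if i ≤ j then (Nat.choose m i : ℤ) * (a i * ((Nat.choose (m - i) (j - i) : ℤ) * b (j - i) * c (m - i - (j - i)))) else 0 := by
    intro j hj
    by_cases hij : i ≤ j
    · have hmul := Nat.choose_mul (n := m) (k := j) (s := i) hij
      simp only [hij, if_pos]
      have : m - j = m - i - (j - i) := by omega
      rw [← this]
      have hc : ((m.choose j : ℤ)) * (j.choose i : ℤ) = (m.choose i : ℤ) * ((m - i).choose (j - i) : ℤ) := by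
        exact_mod_cast congrArg (Nat.cast (R := ℤ)) hmul
      linear_combination (a i * b (j - i) * c (m - j)) * hc
    · have : j < i := by omega
      simp [Nat.choose_eq_zero_of_lt this, hij]
  rw [Finset.sum_congr rfl key, Finset.sum_ite, Finset.sum_const_zero, add_zero]
  have hfil : (Finset.range (m + 1)).filter (fun j => i ≤ j) = Finset.Ico i (m + 1) := by
    ext j; simp [Finset.mem_Ico]; omega
  rw [hfil, Finset.sum_Ico_eq_sum_range]
  have hrw : m + 1 - i = (m - i) + 1 := by omega
  rw [hrw]
  refine Finset.sum_congr rfl (fun l _ => ?_)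
  have hl : i + l - i = l := by omega
  rw [hl]
  ring

theorem pvEconv_congr_left (f f' g : ℕ → ℤ) (m : ℕ) (h : ∀ i, i ≤ m → f i = f' i) :
    pvEconv f g m = pvEconv f' g m := by
  unfold pvEconv
  refine Finset.sum_congr rfl (fun i hi => ?_)
  rw [h i (by have := Finset.mem_range.mp hi; omega)]

theorem pvPw_merge (k : Int) (a b : ℕ) (m : ℕ) :
    pvEconv (pvPw k a) (pvPw k b) m = pvPw k (a + b) m := by
  induction b generalizing m with
  | zero => simpa using pvEconv_delta_right (pvPw k a) m
  | succ b ih =>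
    show pvEconv (pvPw k a) (pvEconv (pvPw k b) (pvGl k)) m = pvPw k (a + b + 1) m
    rw [← pvEconv_assoc]
    show pvEconv (pvEconv (pvPw k a) (pvPw k b)) (pvGl k) m = pvEconv (pvPw k (a + b)) (pvGl k) m
    exact pvEconv_congr_left _ _ _ m (fun i _ => ih i)

theorem pvPw_one (k : Int) (m : ℕ) : pvPw k 1 m = pvGl k m := by
  show pvEconv pvDelta (pvGl k) m = pvGl k m
  exact pvEconv_delta_left _ m

theorem pvGl_neg (k : Int) (hk : k < 0) (i : ℕ) : pvGl k i = 0 := by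
  unfold pvGl
  have : ¬ ((i : Int) ≤ k) := by omega
  simp [this]

theorem pvPw_neg (k : Int) (hk : k < 0) (s m : ℕ) : pvPw k (s + 1) m = 0 := by
  show pvEconv (pvPw k s) (pvGl k) m = 0
  unfold pvEconv
  refine Finset.sum_eq_zero (fun i _ => ?_)
  rw [pvGl_neg k hk]; ring

theorem pvPw_zero_apply (k : Int) (hk : 0 ≤ k) (s : ℕ) : pvPw k s 0 = 1 := by
  induction s with
  | zero => simp [pvPw, pvDelta]
  | succ s ih =>
    show pvEconv (pvPw k s) (pvGl k) 0 = 1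
    unfold pvEconv
    simp [ih, pvGl, hk]

theorem pvPw_support (k : Int) (hk : 0 ≤ k) :
    ∀ (s m : ℕ), s * k.toNat < m → pvPw k s m = 0 := by
  intro s
  induction s with
  | zero =>
    intro m hm
    show pvDelta m = 0
    unfold pvDelta
    rw [if_neg (by omega)]
  | succ s ih =>
    intro m hm
    show pvEconv (pvPw k s) (pvGl k) m = 0
    unfold pvEconv
    refine Finset.sum_eq_zero (fun i hi => ?_)
    rw [Finset.mem_range] at hi
    have hm' : s * k.toNat + k.toNat < m := by
      calc s * k.toNat + k.toNat = (s + 1) * k.toNat := by ring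
        _ < m := hm
    by_cases hs : s * k.toNat < i
    · rw [ih i hs]; ring
    · have : ¬ ((m - i : ℕ) : Int) ≤ k := by omega
      unfold pvGl
      rw [if_neg this]; ring

theorem pvEconv_gl (k : Int) (hk : 0 ≤ k) (f : ℕ → ℤ) (j : ℕ) :
    pvEconv f (pvGl k) j
      = f j + ∑ x ∈ Finset.range (min k.toNat j), (Nat.choose j (x + 1) : ℤ) * f (j - (x + 1)) := by
  unfold pvEconv
  rw [← Finset.sum_range_reflect]
  have step1 : ∀ x ∈ Finset.range (j + 1),
      (Nat.choose j (j + 1 - 1 - x) : ℤ) * f (j + 1 - 1 - x) * pvGl k (j - (j + 1 - 1 - x))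
      = (Nat.choose j x : ℤ) * pvGl k x * f (j - x) := by
    intro x hx
    have hxj : x ≤ j := by have := Finset.mem_range.mp hx; omega
    have h1 : j + 1 - 1 - x = j - x := by omega
    have h2 : j - (j - x) = x := by omega
    rw [h1, h2, Nat.choose_symm hxj]
    ring
  rw [Finset.sum_congr rfl step1, Finset.sum_range_succ']
  have hgl0 : pvGl k 0 = 1 := by simp [pvGl, hk]
  rw [hgl0]
  simp only [Nat.choose_zero_right, Nat.cast_one, one_mul, Nat.sub_zero]
  rw [add_comm]
  congr 1
  -- shrink the range-j sum to range (min k.toNat j)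
  have hsub : Finset.range (min k.toNat j) ⊆ Finset.range j := by
    intro x hx; simp only [Finset.mem_range] at hx ⊢; omega
  have hvan : ∀ x ∈ Finset.range j, x ∉ Finset.range (min k.toNat j) →
      (Nat.choose j (x + 1) : ℤ) * pvGl k (x + 1) * f (j - (x + 1)) = 0 := by
    intro x hx hnx
    have h1 : ¬ ((x + 1 : Int) ≤ k) := by
      simp only [Finset.mem_range] at hx hnx
      omega
    simp [pvGl, h1]
  rw [← Finset.sum_subset hsub hvan]
  refine Finset.sum_congr rfl (fun x hx => ?_)
  have : pvGl k (x + 1) = 1 := by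
    simp only [Finset.mem_range] at hx
    have : (x + 1 : Int) ≤ k := by omega
    simp [pvGl, this]
  rw [this]; ring

theorem pvCbase_eq (x j : ℕ) (hx : x ≤ j) : pvCbase (x : Int) (j : Int) = (j.choose x : ℤ) := by
  unfold pvCbase pvFact
  have h1 : ((j : Int) - (x : Int)).toNat = j - x := by omega
  have h2 : ((j : Int)).toNat = j := by omega
  have h3 : ((x : Int)).toNat = x := by omega
  rw [h1, h2, h3]
  have hfac : (j.factorial : ℤ) = (j.choose x : ℤ) * ((j - x).factorial * x.factorial : ℤ) := by
    have := Nat.choose_mul_factorial_mul_factorial hx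
    push_cast [← this]
    ring
  have hpos : (0 : ℤ) < ((j - x).factorial : ℤ) * (x.factorial : ℤ) := by
    positivity
  rw [PySem.Int.floordiv_eq_ediv_of_pos hpos, hfac,
    Int.mul_ediv_cancel _ (by positivity)]

theorem pvC_eq (x j : ℕ) (hx : x ≤ j) : pvC (x : Int) (j : Int) = (j.choose x : ℤ) := by
  unfold pvC
  have hfd : PySem.Int.floordiv (j : Int) 2 = ((j / 2 : ℕ) : Int) := by
    rw [PySem.Int.floordiv_eq_ediv_of_pos (by norm_num)]
    exact_mod_cast (Int.natCast_div j 2).symm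
  rw [hfd]
  by_cases hb : ((x : Int) > ((j / 2 : ℕ) : Int))
  · rw [if_pos hb]
    have hcast : (j : Int) - (x : Int) = ((j - x : ℕ) : Int) := by omega
    rw [hcast, pvCbase_eq (j - x) j (by omega)]
    exact_mod_cast congrArg (Nat.cast (R := ℤ)) (Nat.choose_symm hx)
  · rw [if_neg hb]
    exact pvCbase_eq x j hx

theorem pvP_pos : (0 : Int) < pvP := by unfold pvP; norm_num

theorem pvXloop_char (k j : Int) (hj : 1 ≤ j) :
    ∀ (t : ℕ) (x0 : Int) (dp : List Int), (k + 1 - x0).toNat = t → 1 ≤ x0 →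
      j.toNat < dp.length →
      pvXloop k j x0 dp =
        if min k j < x0 then dp
        else dp.set j.toNat
          ((PySem.List.pyGetD dp j 0 +
            ((PySem.List.pyRange x0 (min k j + 1) 1).map
              (fun x => pvC x j * PySem.List.pyGetD dp (j - x) 0)).sum) % pvP) := by
  intro t
  induction t with
  | zero =>
    intro x0 dp ht hx0 hlen
    have hk : k + 1 ≤ x0 := by omega
    rw [pvXloop, dif_neg (by omega)]
    rw [if_pos (by omega)]
  | succ t ih =>
    intro x0 dp ht hx0 hlen
    rw [pvXloop]
    by_cases hlt : x0 < k + 1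
    · rw [dif_pos hlt]
      by_cases hbig : x0 > j
      · rw [if_pos hbig, if_pos (by omega)]
      · rw [if_neg hbig]
        have hx0j : x0 ≤ j := by omega
        have hmin : ¬ (min k j < x0) := by omega
        rw [if_neg hmin]
        set v1 : Int := PySem.List.pyGetD dp j 0 + pvC x0 j * PySem.List.pyGetD dp (j - x0) 0 with hv1
        have hset1 : PySem.List.pySetD dp j v1 = dp.set j.toNat v1 :=
          PySem.List.pySetD_of_nonneg _ _ (by omega)
        have hget1 : PySem.List.pyGetD (dp.set j.toNat v1) j 0 = v1 := by
          rw [PySem.List.pyGetD_eq_getElem _ _ (by omega) (by rw [List.length_set]; omega)]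
          simp
        have hset2 : PySem.List.pySetD (dp.set j.toNat v1) j (PySem.Int.mod v1 pvP)
            = dp.set j.toNat (v1 % pvP) := by
          rw [PySem.List.pySetD_of_nonneg _ _ (by omega), List.set_set,
            PySem.Int.mod_eq_emod_of_pos pvP_pos]
        show pvXloop k j (x0 + 1)
            (PySem.List.pySetD (PySem.List.pySetD dp j v1) j
              (PySem.Int.mod (PySem.List.pyGetD (PySem.List.pySetD dp j v1) j 0) pvP)) = _
        rw [hset1, hget1, hset2]
        rw [ih (x0 + 1) _ (by omega) (by omega) (by rw [List.length_set]; omega)]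
        have hx0min : x0 ≤ min k j := by omega
        by_cases hm2 : min k j < x0 + 1
        · rw [if_pos hm2]
          have hminx : min k j = x0 := by omega
          rw [hminx, PySem.List.pyRange_one_singleton]
          simp [hv1]
        · rw [if_neg hm2, List.set_set]
          have hgd : PySem.List.pyGetD (dp.set j.toNat (v1 % pvP)) j 0 = v1 % pvP := by
            rw [PySem.List.pyGetD_eq_getElem _ _ (by omega) (by rw [List.length_set]; omega)]
            simp
          have hmap : (PySem.List.pyRange (x0 + 1) (min k j + 1) 1).map
                (fun x => pvC x j * PySem.List.pyGetD (dp.set j.toNat (v1 % pvP)) (j - x) 0)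
              = (PySem.List.pyRange (x0 + 1) (min k j + 1) 1).map
                (fun x => pvC x j * PySem.List.pyGetD dp (j - x) 0) := by
            refine List.map_congr_left (fun x hx => ?_)
            rw [PySem.List.mem_pyRange_one] at hx
            have h1 : (0 : Int) ≤ j - x := by omega
            have h2 : (j - x).toNat < dp.length := by omega
            have h3 : (j - x).toNat ≠ j.toNat := by omega
            rw [PySem.List.pyGetD_eq_getElem _ _ h1 (by rw [List.length_set]; omega),
              PySem.List.pyGetD_eq_getElem _ _ h1 (by omega),
              List.getElem_set_ne (by omega)]
          rw [hgd, hmap]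
          have hcons : PySem.List.pyRange x0 (min k j + 1) 1
              = x0 :: PySem.List.pyRange (x0 + 1) (min k j + 1) 1 :=
            PySem.List.pyRange_one_cons (by omega)
          rw [hcons, List.map_cons, List.sum_cons, Int.emod_add_emod]
          congr 1
          rw [hv1]
          ring_nf
    · rw [dif_neg hlt, if_pos (by omega)]

-- dp-state abstractions
def pvMix (k : Int) (N s t : ℕ) : List Int :=
  (List.range (N + 1)).map (fun m => (if t < m then pvPw k (s + 1) m else pvPw k s m) % pvP)

def pvVec (N : ℕ) (f : ℕ → ℤ) : List Int :=
  (List.range (N + 1)).map (fun m => f m % pvP)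

theorem pvMix_length (k : Int) (N s t : ℕ) : (pvMix k N s t).length = N + 1 := by
  simp [pvMix]

theorem pvMix_pyGetD (k : Int) (N s t : ℕ) (i : Int) (h0 : 0 ≤ i) (h1 : i.toNat ≤ N) :
    PySem.List.pyGetD (pvMix k N s t) i 0
      = (if t < i.toNat then pvPw k (s + 1) i.toNat else pvPw k s i.toNat) % pvP := by
  rw [PySem.List.pyGetD_eq_getElem _ _ h0 (by rw [pvMix_length]; omega)]
  simp [pvMix]

theorem pvMod_sum_helper (a : ℤ) (s : Finset ℕ) (c b : ℕ → ℤ) :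
    (a % pvP + ∑ q ∈ s, c q * (b q % pvP)) % pvP = (a + ∑ q ∈ s, c q * b q) % pvP := by
  rw [Int.emod_add_emod, Int.add_emod a, Finset.sum_int_mod s pvP (fun q => c q * (b q % pvP))]
  conv_rhs => rw [Int.add_emod a, Finset.sum_int_mod s pvP (fun q => c q * b q)]
  have hterm : ∀ q ∈ s, (c q * (b q % pvP)) % pvP = (c q * b q) % pvP := by
    intro q _
    rw [Int.mul_emod, Int.mul_emod (c q) (b q), Int.emod_emod]
  rw [Finset.sum_congr rfl hterm]

theorem pvListRangeSum (g : ℕ → ℤ) (m : ℕ) :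
    ((List.range m).map g).sum = ∑ i ∈ Finset.range m, g i := by
  induction m with
  | zero => simp
  | succ m ih => rw [List.range_succ, List.map_append, List.sum_append, Finset.sum_range_succ, ih]; simp

theorem pvPw_step_k0 (k : Int) (hk : k = 0) (s m : ℕ) : pvPw k (s + 1) m = pvPw k s m := by
  subst hk
  have hgl : pvGl 0 = pvDelta := by
    funext i
    unfold pvGl pvDelta
    by_cases h : i = 0 <;> simp [h] <;> omega
  show pvEconv (pvPw 0 s) (pvGl 0) m = pvPw 0 s m
  rw [hgl]
  exact pvEconv_delta_right _ m

theorem pvXloop_mix (k n : Int) (N : ℕ) (hN : n.toNat = N) (hk : 0 ≤ k) (s : ℕ)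
    (j : Int) (hj1 : 1 ≤ j) (hjN : j ≤ n) :
    pvXloop k j 1 (pvMix k N s j.toNat) = pvMix k N s (j.toNat - 1) := by
  have hjn : j.toNat ≤ N := by omega
  have hlen : j.toNat < (pvMix k N s j.toNat).length := by rw [pvMix_length]; omega
  rw [pvXloop_char k j hj1 (k + 1 - 1).toNat 1 _ rfl le_rfl hlen]
  by_cases hmin : min k j < 1
  · rw [if_pos hmin]
    have hk0 : k = 0 := by omega
    apply List.ext_getElem (by rw [pvMix_length, pvMix_length])
    intro m hm _
    simp only [pvMix, List.getElem_map, List.getElem_range]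
    by_cases hc1 : j.toNat < m <;> by_cases hc2 : j.toNat - 1 < m <;>
      simp only [hc1, hc2, if_true, if_false] <;>
      first
        | rfl
        | (rw [pvPw_step_k0 k hk0])
        | (exfalso; omega)
  · rw [if_neg hmin]
    have hget : PySem.List.pyGetD (pvMix k N s j.toNat) j 0 = pvPw k s j.toNat % pvP := by
      rw [pvMix_pyGetD k N s j.toNat j (by omega) hjn]
      simp
    have hMeq : (min k j + 1 - 1).toNat = min k.toNat j.toNat := by omega
    have hsum : ((PySem.List.pyRange 1 (min k j + 1) 1).map
          (fun x => pvC x j * PySem.List.pyGetD (pvMix k N s j.toNat) (j - x) 0)).sum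
        = ∑ q ∈ Finset.range (min k.toNat j.toNat),
            (Nat.choose j.toNat (q + 1) : ℤ) * (pvPw k s (j.toNat - (q + 1)) % pvP) := by
      rw [PySem.List.pyRange_one, List.map_map, hMeq, pvListRangeSum]
      refine Finset.sum_congr rfl fun q hq => ?_
      have hqlt : q < min k.toNat j.toNat := Finset.mem_range.mp hq
      have hx : (1 : Int) + q = ((q + 1 : ℕ) : Int) := by push_cast; ring
      have hjcast : (j.toNat : Int) = j := by omega
      simp only [Function.comp]
      have hC : pvC ((q + 1 : ℕ) : Int) j = (j.toNat.choose (q + 1) : ℤ) := by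
        rw [← hjcast]
        exact pvC_eq (q + 1) j.toNat (by omega)
      rw [hx, hC]
      congr 1
      rw [pvMix_pyGetD k N s j.toNat _ (by omega) (by omega)]
      rw [show (j - ((q + 1 : ℕ) : Int)).toNat = j.toNat - (q + 1) by omega, if_neg (by omega)]
    rw [hget, hsum, pvMod_sum_helper]
    have hval : pvPw k s j.toNat + ∑ q ∈ Finset.range (min k.toNat j.toNat),
        (Nat.choose j.toNat (q + 1) : ℤ) * pvPw k s (j.toNat - (q + 1))
        = pvPw k (s + 1) j.toNat := by
      rw [← pvEconv_gl k hk (pvPw k s) j.toNat]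
      rfl
    rw [hval]
    apply List.ext_getElem (by rw [List.length_set, pvMix_length, pvMix_length])
    intro m hm hm2
    rw [pvMix_length] at hm2
    by_cases hmj : m = j.toNat
    · subst hmj
      rw [List.getElem_set_self]
      simp only [pvMix, List.getElem_map, List.getElem_range]
      rw [if_pos (by omega)]
    · rw [List.getElem_set_ne (by omega)]
      simp only [pvMix, List.getElem_map, List.getElem_range]
      by_cases hc1 : j.toNat < m <;> by_cases hc2 : j.toNat - 1 < m <;>
        first
          | (exfalso; omega)
          | (simp only [hc1, hc2, if_true, if_false])
          | (exfalso; exact hmj (by omega))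

theorem pvJloop_mix (k n : Int) (N : ℕ) (hN : n.toNat = N) (hk : 0 ≤ k) (s : ℕ)
    (i : Int) (hi : i ≠ 25) :
    ∀ (jn : ℕ), (jn : Int) ≤ n →
      pvJloop k n i (PySem.List.pyRange (jn : Int) 0 (-1)) (pvMix k N s jn)
        = (none, pvMix k N s 0) := by
  intro jn
  induction jn with
  | zero =>
    intro _
    rw [PySem.List.pyRange_neg_one_eq_nil (by norm_num)]
    rfl
  | succ jn ih =>
    intro hle
    rw [PySem.List.pyRange_neg_one_cons (by exact_mod_cast Nat.succ_pos jn)]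
    show (let dp' := pvXloop k ((jn + 1 : ℕ) : Int) 1 (pvMix k N s (jn + 1));
      if i == 25 && (((jn + 1 : ℕ) : Int) == n) then (some (PySem.List.pyGetD dp' (-1) 0), dp')
      else pvJloop k n i (PySem.List.pyRange (((jn + 1 : ℕ) : Int) - 1) 0 (-1)) dp') = _
    have hx : pvXloop k ((jn + 1 : ℕ) : Int) 1 (pvMix k N s (jn + 1)) = pvMix k N s jn := by
      have := pvXloop_mix k n N hN hk s ((jn + 1 : ℕ) : Int) (by exact_mod_cast Nat.succ_pos jn) hle
      rw [Int.toNat_natCast] at this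
      simpa using this
    have hcond : (i == 25 && (((jn + 1 : ℕ) : Int) == n)) = false := by
      simp [hi]
    have hcast : (((jn + 1 : ℕ) : Int) - 1) = (jn : Int) := by push_cast; ring
    simp only [hx, hcond, Bool.false_eq_true, if_false, hcast]
    exact ih (by omega)

theorem pvMix_zero_succ (k : Int) (hk : 0 ≤ k) (N s : ℕ) :
    pvMix k N s 0 = pvMix k N (s + 1) N := by
  apply List.ext_getElem (by rw [pvMix_length, pvMix_length])
  intro m hm _
  rw [pvMix_length] at hm
  simp only [pvMix, List.getElem_map, List.getElem_range]
  by_cases hm0 : m = 0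
  · subst hm0
    rw [if_neg (by omega), if_neg (by omega), pvPw_zero_apply k hk, pvPw_zero_apply k hk]
  · rw [if_pos (by omega), if_neg (by omega)]

theorem pvIloop_done (k n : Int) (N : ℕ) (hN : n.toNat = N) (hk : 0 ≤ k) (hn : 1 ≤ n) :
    ∀ (t s : ℕ), s + t = 25 →
      pvIloop k n (PySem.List.pyRange (s : Int) 26 1) (pvMix k N s N)
        = some (pvPw k 26 N % pvP) := by
  intro t
  induction t with
  | zero =>
    intro s hs
    have hs25 : s = 25 := by omega
    subst hs25
    rw [show ((25 : ℕ) : Int) = (25 : Int) by norm_num,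
      show (26 : Int) = (25 : Int) + 1 by norm_num, PySem.List.pyRange_one_singleton]
    show (match pvJloop k n 25 (PySem.List.pyRange n 0 (-1)) (pvMix k N 25 N) with
      | (some v, _) => some v
      | (none, dp') => pvIloop k n [] dp') = _
    rw [PySem.List.pyRange_neg_one_cons (by omega)]
    have hx : pvXloop k n 1 (pvMix k N 25 N) = pvMix k N 25 (N - 1) := by
      have := pvXloop_mix k n N hN hk 25 n hn le_rfl
      rw [hN] at this
      exact this
    show (match (let dp' := pvXloop k n 1 (pvMix k N 25 N);
      if (25 : Int) == 25 && (n == n) then (some (PySem.List.pyGetD dp' (-1) 0), dp')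
      else pvJloop k n 25 (PySem.List.pyRange (n - 1) 0 (-1)) dp') with
      | (some v, _) => some v
      | (none, dp') => pvIloop k n [] dp') = _
    simp only [hx, BEq.refl, Bool.and_self, if_true]
    show some (PySem.List.pyGetD (pvMix k N 25 (N - 1)) (-1) 0) = _
    rw [PySem.List.pyGetD_neg_ofNat _ 1 _ (by norm_num) (by rw [pvMix_length]; omega)]
    simp only [pvMix_length]
    simp only [pvMix, List.getElem_map, List.getElem_range]
    rw [if_pos (by omega), show N + 1 - 1 = N by omega]
  | succ t ih =>
    intro s hs
    rw [PySem.List.pyRange_one_cons (by omega : ((s : ℕ) : Int) < 26)]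
    have hi : ((s : ℕ) : Int) ≠ 25 := by omega
    have hjl : pvJloop k n ((s : ℕ) : Int) (PySem.List.pyRange n 0 (-1)) (pvMix k N s N)
        = (none, pvMix k N s 0) := by
      have := pvJloop_mix k n N hN hk s ((s : ℕ) : Int) hi N (by omega)
      rw [show ((N : ℕ) : Int) = n by omega] at this
      exact this
    show (match pvJloop k n ((s : ℕ) : Int) (PySem.List.pyRange n 0 (-1)) (pvMix k N s N) with
      | (some v, _) => some v
      | (none, dp') => pvIloop k n (PySem.List.pyRange (((s : ℕ) : Int) + 1) 26) dp') = _
    rw [hjl]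
    show pvIloop k n (PySem.List.pyRange (((s : ℕ) : Int) + 1) 26) (pvMix k N s 0) = _
    rw [pvMix_zero_succ k hk N s, show (((s : ℕ) : Int) + 1) = (((s + 1 : ℕ)) : Int) by push_cast; ring]
    exact ih (s + 1) (by omega)

theorem pvInit_mix (k n : Int) (N : ℕ) (hN : n.toNat = N) (hn : 1 ≤ n) :
    PySem.List.pySetD (List.replicate (n + 1).toNat 0) 0 1 = pvMix k N 0 N := by
  rw [PySem.List.pySetD_of_nonneg _ _ le_rfl, show (0 : Int).toNat = 0 from rfl]
  apply List.ext_getElem (by rw [List.length_set, List.length_replicate, pvMix_length]; omega)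
  intro m hm hm2
  rw [pvMix_length] at hm2
  by_cases hm0 : m = 0
  · subst hm0
    rw [List.getElem_set_self]
    simp only [pvMix, List.getElem_map, List.getElem_range]
    rw [if_neg (by omega)]
    show (1 : Int) = pvDelta 0 % pvP
    unfold pvDelta pvP
    norm_num
  · rw [List.getElem_set_ne (by omega), List.getElem_replicate]
    simp only [pvMix, List.getElem_map, List.getElem_range]
    rw [if_neg (by omega)]
    show (0 : Int) = pvDelta m % pvP
    unfold pvDelta pvP
    simp [hm0]

theorem pvXloop_neg (k j : Int) (hk : k < 0) (dp : List Int) : pvXloop k j 1 dp = dp := by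
  rw [pvXloop, dif_neg (by omega)]

theorem pvIloop_neg (k n : Int) (hk : k < 0) (hn : 1 ≤ n) (dp : List Int) :
    ∀ (t s : ℕ), s + t = 25 →
      pvIloop k n (PySem.List.pyRange (s : Int) 26 1) dp
        = some (PySem.List.pyGetD dp (-1) 0) := by
  intro t
  induction t with
  | zero =>
    intro s hs
    have hs25 : s = 25 := by omega
    subst hs25
    rw [show ((25 : ℕ) : Int) = (25 : Int) by norm_num,
      show (26 : Int) = (25 : Int) + 1 by norm_num, PySem.List.pyRange_one_singleton]
    show (match pvJloop k n 25 (PySem.List.pyRange n 0 (-1)) dp with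
      | (some v, _) => some v
      | (none, dp') => pvIloop k n [] dp') = _
    rw [PySem.List.pyRange_neg_one_cons (by omega)]
    show (match (let dp' := pvXloop k n 1 dp;
      if (25 : Int) == 25 && (n == n) then (some (PySem.List.pyGetD dp' (-1) 0), dp')
      else pvJloop k n 25 (PySem.List.pyRange (n - 1) 0 (-1)) dp') with
      | (some v, _) => some v
      | (none, dp') => pvIloop k n [] dp') = _
    simp only [pvXloop_neg k _ hk, BEq.refl, Bool.and_self, if_true]
  | succ t ih =>
    intro s hs
    rw [PySem.List.pyRange_one_cons (by omega : ((s : ℕ) : Int) < 26)]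
    have hjl : ∀ (js : List Int), pvJloop k n ((s : ℕ) : Int) js dp = (none, dp) := by
      intro js
      induction js with
      | nil => rfl
      | cons j js ihs =>
        show (let dp' := pvXloop k j 1 dp;
          if ((s : ℕ) : Int) == 25 && (j == n) then (some (PySem.List.pyGetD dp' (-1) 0), dp')
          else pvJloop k n ((s : ℕ) : Int) js dp') = _
        have hcond : (((s : ℕ) : Int) == 25 && (j == n)) = false := by
          have : ((s : ℕ) : Int) ≠ 25 := by omega
          simp [this]
        simp only [pvXloop_neg k _ hk, hcond, Bool.false_eq_true, if_false]
        exact ihs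
    show (match pvJloop k n ((s : ℕ) : Int) (PySem.List.pyRange n 0 (-1)) dp with
      | (some v, _) => some v
      | (none, dp') => pvIloop k n (PySem.List.pyRange (((s : ℕ) : Int) + 1) 26) dp') = _
    rw [hjl]
    show pvIloop k n (PySem.List.pyRange (((s : ℕ) : Int) + 1) 26) dp = _
    rw [show (((s : ℕ) : Int) + 1) = (((s + 1 : ℕ)) : Int) by push_cast; ring]
    exact ih (s + 1) (by omega)

theorem pvKeyboard_eq (k n : Int) (hn : 1 ≤ n) :
    keyboard k n = pvPw k 26 n.toNat % pvP := by
  unfold keyboard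
  show (pvIloop k n (PySem.List.pyRange 0 26)
    (PySem.List.pySetD (List.replicate (n + 1).toNat 0) 0 1)).getD 0 = _
  by_cases hk : 0 ≤ k
  · rw [pvInit_mix k n n.toNat rfl hn]
    have h0 : PySem.List.pyRange 0 26 1 = PySem.List.pyRange (((0 : ℕ) : Int)) 26 1 := by norm_num
    rw [h0, pvIloop_done k n n.toNat rfl hk hn 25 0 rfl]
    rfl
  · push_neg at hk
    have h0 : PySem.List.pyRange 0 26 1 = PySem.List.pyRange (((0 : ℕ) : Int)) 26 1 := by norm_num
    rw [h0, pvIloop_neg k n hk hn _ 25 0 rfl]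
    have hlast : PySem.List.pyGetD
        (PySem.List.pySetD (List.replicate (n + 1).toNat (0 : Int)) 0 1) (-1) 0 = 0 := by
      rw [PySem.List.pySetD_of_nonneg _ _ le_rfl, show (0 : Int).toNat = 0 from rfl,
        show (n + 1).toNat = n.toNat + 1 by omega, List.replicate_succ, List.set_cons_zero]
      rw [PySem.List.pyGetD_neg_ofNat _ 1 _ (by norm_num) (by simp)]
      simp only [List.length_cons, List.length_replicate, Nat.add_sub_cancel]
      rw [List.getElem_cons]
      simp [show ¬ (n.toNat = 0) by omega]
    show (some (PySem.List.pyGetD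
      (PySem.List.pySetD (List.replicate (n + 1).toNat 0) 0 1) (-1) 0)).getD 0
      = pvPw k 26 n.toNat % pvP
    rw [Option.getD_some, show (26 : ℕ) = 25 + 1 by norm_num, pvPw_neg k hk 25 n.toNat,
      Int.zero_emod]
    exact hlast

def pvRowL (m : ℕ) : List Int := (List.range (m + 1)).map (fun i => (Nat.choose m i : ℤ) % pvP)

theorem pvRowL_pyGetD (m i : ℕ) (hi : i ≤ m) :
    PySem.List.pyGetD (pvRowL m) (i : Int) 0 = (Nat.choose m i : ℤ) % pvP := by
  rw [PySem.List.pyGetD_eq_getElem _ _ (by omega) (by simp [pvRowL]; omega)]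
  simp [pvRowL]

theorem pvRows_eq (M : ℕ) :
    pvRows ((M : ℕ) : Int) = (List.range (M + 1)).map pvRowL := by
  unfold pvRows
  induction M with
  | zero =>
    rw [show ((0 : ℕ) : Int) + 1 = 1 by norm_num, PySem.List.pyRange_one_eq_nil le_rfl]
    show [[1]] = [pvRowL 0]
    simp [pvRowL, pvP]
  | succ M ih =>
    have hsplit : PySem.List.pyRange 1 (((M + 1 : ℕ) : Int) + 1) 1
        = PySem.List.pyRange 1 (((M : ℕ) : Int) + 1) 1 ++ [((M : ℕ) : Int) + 1] := by
      rw [show (((M + 1 : ℕ) : Int) + 1) = (((M : ℕ) : Int) + 1) + 1 by push_cast; ring]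
      exact PySem.List.pyRange_one_succ_right (by omega)
    rw [hsplit, List.foldl_append, ih]
    show ((List.range (M + 1)).map pvRowL) ++ [1 :: (((PySem.List.pyRange 1 (((M : ℕ) : Int) + 1) 1).map (fun i =>
        PySem.Int.mod (PySem.List.pyGetD (PySem.List.pyGetD ((List.range (M + 1)).map pvRowL) (-1) []) (i - 1) 0
          + PySem.List.pyGetD (PySem.List.pyGetD ((List.range (M + 1)).map pvRowL) (-1) []) i 0) pvMOD))
        ++ [1])] = _
    have hprev : PySem.List.pyGetD ((List.range (M + 1)).map pvRowL) (-1) ([] : List Int) = pvRowL M := by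
      rw [PySem.List.pyGetD_neg_ofNat _ 1 _ (by norm_num) (by simp)]
      simp
    rw [hprev]
    rw [List.range_succ (n := M + 1), List.map_append]
    congr 1
    show [_] = [pvRowL (M + 1)]
    congr 1
    -- the freshly appended row is Pascal's next row mod pvP
    apply List.ext_getElem
    · simp only [List.length_cons, List.length_append, List.length_map,
        PySem.List.length_pyRange_one, List.length_nil, pvRowL, List.length_range]
      omega
    intro t ht ht2
    have hR : (pvRowL (M + 1))[t]'ht2 = (Nat.choose (M + 1) t : ℤ) % pvP := by
      simp [pvRowL]
    rw [hR]
    rw [List.length_cons, List.length_append, List.length_map, PySem.List.length_pyRange_one, List.length_singleton] at ht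
    by_cases ht0 : t = 0
    · subst ht0
      rw [List.getElem_cons_zero]
      simp [pvP]

    · rw [List.getElem_cons]
      rw [dif_neg ht0]
      by_cases htm : t - 1 < M
      · rw [List.getElem_append_left (by simp [PySem.List.length_pyRange_one]; omega)]
        rw [List.getElem_map]
        have hel : (PySem.List.pyRange 1 (((M : ℕ) : Int) + 1) 1)[t - 1]'(by
            rw [PySem.List.length_pyRange_one]; omega) = 1 + ((t - 1 : ℕ) : Int) := by
          rw [PySem.List.getElem_pyRange_one]
        rw [hel]
        have h1 : (1 : Int) + ((t - 1 : ℕ) : Int) - 1 = ((t - 1 : ℕ) : Int) := by ring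
        have h2 : (1 : Int) + ((t - 1 : ℕ) : Int) = ((t : ℕ) : Int) := by omega
        rw [h1, h2, pvRowL_pyGetD M (t - 1) (by omega), pvRowL_pyGetD M t (by omega)]
        rw [PySem.Int.mod_eq_emod_of_pos (by unfold pvMOD; norm_num)]
        show _ = ((Nat.choose (M + 1) t : ℤ)) % pvP
        have hp : Nat.choose (M + 1) t = Nat.choose M (t - 1) + Nat.choose M t := by
          obtain ⟨u, rfl⟩ : ∃ u, t = u + 1 := ⟨t - 1, by omega⟩
          simpa using Nat.choose_succ_succ M u
        rw [hp]
        push_cast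
        rw [show pvMOD = pvP from rfl, ← Int.add_emod]
      · -- last entry: t = M + 1
        have htM : t = M + 1 := by omega
        rw [List.getElem_append_right (by
          simp only [List.length_map, PySem.List.length_pyRange_one]; omega)]
        rw [List.getElem_singleton]
        subst htM
        simp [pvP, Nat.choose_self]

theorem pvPowLoop_26 (rows : List (List Int)) (n : Int) (res base : List Int) :
    pvPowLoop rows n 26 res base =
      pvConv rows n
        (pvConv rows n (pvConv rows n res (pvConv rows n base base))
          (pvConv rows n (pvConv rows n (pvConv rows n base base) (pvConv rows n base base))
            (pvConv rows n (pvConv rows n base base) (pvConv rows n base base))))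
        (pvConv rows n
          (pvConv rows n (pvConv rows n (pvConv rows n base base) (pvConv rows n base base))
            (pvConv rows n (pvConv rows n base base) (pvConv rows n base base)))
          (pvConv rows n
            (pvConv rows n (pvConv rows n base base) (pvConv rows n base base))
            (pvConv rows n (pvConv rows n base base) (pvConv rows n base base)))) := by
  rw [pvPowLoop]; norm_num
  rw [pvPowLoop]; norm_num
  rw [pvPowLoop]; norm_num
  rw [pvPowLoop]; norm_num
  rw [pvPowLoop]; norm_num
  rw [pvPowLoop]

theorem pvVec_pyGetD (N : ℕ) (f : ℕ → ℤ) (i : Int) (h0 : 0 ≤ i) (h1 : i.toNat ≤ N) :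
    PySem.List.pyGetD (pvVec N f) i 0 = f i.toNat % pvP := by
  rw [PySem.List.pyGetD_eq_getElem _ _ h0 (by simp [pvVec]; omega)]
  simp [pvVec]

theorem pvConv_vec (n : Int) (N : ℕ) (hN : n = (N : Int)) (f g : ℕ → ℤ) :
    pvConv (pvRows n) n (pvVec N f) (pvVec N g) = pvVec N (pvEconv f g) := by
  subst hN
  unfold pvConv pvVec
  rw [show ((N : Int) + 1) = ((N + 1 : ℕ) : Int) by push_cast; ring,
    PySem.List.pyRange_zero_natCast, List.map_map]
  apply List.map_congr_left
  intro m hm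
  rw [List.mem_range] at hm
  simp only [Function.comp]
  rw [PySem.Int.mod_eq_emod_of_pos (by unfold pvMOD; norm_num),
    show pvMOD = pvP from rfl]
  have hrow : PySem.List.pyGetD (pvRows ((N : ℕ) : Int)) ((m : ℕ) : Int) [] = pvRowL m := by
    rw [pvRows_eq N, PySem.List.pyGetD_eq_getElem _ _ (by omega) (by simp; omega)]
    simp
  have hinner : ((PySem.List.pyRange 0 (((m : ℕ) : Int) + 1) 1).map (fun i =>
      PySem.List.pyGetD (PySem.List.pyGetD (pvRows ((N : ℕ) : Int)) ((m : ℕ) : Int) []) i 0 *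
        PySem.List.pyGetD ((List.range (N + 1)).map (fun m => f m % pvP)) i 0 *
        PySem.List.pyGetD ((List.range (N + 1)).map (fun m => g m % pvP)) (((m : ℕ) : Int) - i) 0)).sum
      = ∑ i ∈ Finset.range (m + 1),
          ((Nat.choose m i : ℤ) % pvP) * (f i % pvP) * (g (m - i) % pvP) := by
    rw [show (((m : ℕ) : Int) + 1) = ((m + 1 : ℕ) : Int) by push_cast; ring,
      PySem.List.pyRange_zero_natCast, List.map_map, pvListRangeSum]
    refine Finset.sum_congr rfl fun i hi => ?_
    rw [Finset.mem_range] at hi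
    simp only [Function.comp]
    rw [hrow, pvRowL_pyGetD m i (by omega)]
    have ha : PySem.List.pyGetD ((List.range (N + 1)).map (fun m => f m % pvP)) ((i : ℕ) : Int) 0
        = f i % pvP := by
      rw [PySem.List.pyGetD_eq_getElem _ _ (by omega) (by simp; omega)]
      simp
    have hb : PySem.List.pyGetD ((List.range (N + 1)).map (fun m => g m % pvP)) (((m : ℕ) : Int) - ((i : ℕ) : Int)) 0
        = g (m - i) % pvP := by
      rw [show (((m : ℕ) : Int) - ((i : ℕ) : Int)) = (((m - i : ℕ)) : Int) by omega]
      rw [PySem.List.pyGetD_eq_getElem _ _ (by omega) (by simp; omega)]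
      simp
    rw [ha, hb]
  rw [hinner]
  show _ = pvEconv f g m % pvP
  unfold pvEconv
  rw [Finset.sum_int_mod (Finset.range (m + 1)) pvP
    (fun i => (Nat.choose m i : ℤ) * f i * g (m - i))]
  rw [Finset.sum_int_mod (Finset.range (m + 1)) pvP
    (fun i => ((Nat.choose m i : ℤ) % pvP) * (f i % pvP) * (g (m - i) % pvP))]
  congr 1
  refine Finset.sum_congr rfl fun i _ => ?_
  have h1 : Int.ModEq pvP ((Nat.choose m i : ℤ) % pvP) (Nat.choose m i : ℤ) :=
    Int.emod_emod_of_dvd _ dvd_rfl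
  have h2 : Int.ModEq pvP (f i % pvP) (f i) := Int.emod_emod_of_dvd _ dvd_rfl
  have h3 : Int.ModEq pvP (g (m - i) % pvP) (g (m - i)) := Int.emod_emod_of_dvd _ dvd_rfl
  exact (h1.mul h2).mul h3

theorem pvEconv_congr (f f' g g' : ℕ → ℤ) (m : ℕ)
    (hf : ∀ i, i ≤ m → f i = f' i) (hg : ∀ i, i ≤ m → g i = g' i) :
    pvEconv f g m = pvEconv f' g' m := by
  unfold pvEconv
  refine Finset.sum_congr rfl (fun i hi => ?_)
  rw [Finset.mem_range] at hi
  rw [hf i (by omega), hg (m - i) (by omega)]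

theorem pvKeyboardAlt_eq (k n : Int) (hn : 1 ≤ n) :
    keyboard_alt k n = pvPw k 26 n.toNat % pvP := by
  unfold keyboard_alt
  show (if n > 26 * max 0 (min k n) then (0 : Int) else PySem.List.pyGetD (pvPowLoop (pvRows n) n 26
    ((1 : Int) :: List.replicate n.toNat 0)
    ((PySem.List.pyRange 0 (n + 1) 1).map (fun i => if i ≤ k then (1 : Int) else 0))) n 0) = _
  by_cases hguard : n > 26 * max 0 (min k n)
  · rw [if_pos hguard]
    by_cases hk : 0 ≤ k
    · rw [pvPw_support k hk 26 n.toNat (by omega), Int.zero_emod]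
    · rw [show (26 : ℕ) = 25 + 1 by norm_num, pvPw_neg k (by omega) 25 n.toNat, Int.zero_emod]
  rw [if_neg hguard]
  have hn' : n = (n.toNat : Int) := by omega
  have hres : (1 : Int) :: List.replicate n.toNat 0 = pvVec n.toNat pvDelta := by
    apply List.ext_getElem (by simp [pvVec])
    intro m hm hm2
    rw [List.getElem_cons]
    by_cases h0 : m = 0
    · subst h0
      rw [dif_pos rfl]
      simp only [pvVec, List.getElem_map, List.getElem_range, pvDelta]
      unfold pvP
      norm_num
    · rw [dif_neg h0, List.getElem_replicate]
      simp only [pvVec, List.getElem_map, List.getElem_range, pvDelta]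
      rw [if_neg h0]
      simp
  have hg : (PySem.List.pyRange 0 (n + 1) 1).map (fun i => if i ≤ k then (1 : Int) else 0)
      = pvVec n.toNat (pvGl k) := by
    rw [hn', show (((n.toNat : ℕ) : Int) + 1) = ((n.toNat + 1 : ℕ) : Int) by push_cast; ring,
      PySem.List.pyRange_zero_natCast, List.map_map]
    unfold pvVec
    apply List.map_congr_left
    intro m hm
    simp only [Function.comp]
    unfold pvGl
    by_cases hik : ((m : ℕ) : Int) ≤ k
    · norm_num [hik, pvP]
    · norm_num [hik]

  rw [hres, hg, pvPowLoop_26]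
  simp only [pvConv_vec n n.toNat hn']
  have hδ : pvDelta = pvPw k 0 := rfl
  have h2 : ∀ m : ℕ, pvEconv (pvGl k) (pvGl k) m = pvPw k 2 m := by
    intro m
    have : pvPw k 2 m = pvEconv (pvPw k 1) (pvGl k) m := rfl
    rw [this]
    exact pvEconv_congr _ _ _ _ m (fun i _ => (pvPw_one k i).symm) (fun i _ => rfl)
  have h4 : ∀ m : ℕ, pvEconv (fun x => pvEconv (pvGl k) (pvGl k) x) (fun x => pvEconv (pvGl k) (pvGl k) x) m = pvPw k 4 m := by
    intro m
    rw [pvEconv_congr _ (pvPw k 2) _ (pvPw k 2) m (fun i _ => h2 i) (fun i _ => h2 i)]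
    exact pvPw_merge k 2 2 m
  have h8 : ∀ m : ℕ, pvEconv (fun x => pvEconv (fun y => pvEconv (pvGl k) (pvGl k) y) (fun y => pvEconv (pvGl k) (pvGl k) y) x)
      (fun x => pvEconv (fun y => pvEconv (pvGl k) (pvGl k) y) (fun y => pvEconv (pvGl k) (pvGl k) y) x) m = pvPw k 8 m := by
    intro m
    rw [pvEconv_congr _ (pvPw k 4) _ (pvPw k 4) m (fun i _ => h4 i) (fun i _ => h4 i)]
    exact pvPw_merge k 4 4 m
  have h16 : ∀ m : ℕ, pvEconv
      (fun x => pvEconv (fun y => pvEconv (fun z => pvEconv (pvGl k) (pvGl k) z) (fun z => pvEconv (pvGl k) (pvGl k) z) y)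
        (fun y => pvEconv (fun z => pvEconv (pvGl k) (pvGl k) z) (fun z => pvEconv (pvGl k) (pvGl k) z) y) x)
      (fun x => pvEconv (fun y => pvEconv (fun z => pvEconv (pvGl k) (pvGl k) z) (fun z => pvEconv (pvGl k) (pvGl k) z) y)
        (fun y => pvEconv (fun z => pvEconv (pvGl k) (pvGl k) z) (fun z => pvEconv (pvGl k) (pvGl k) z) y) x) m
      = pvPw k 16 m := by
    intro m
    rw [pvEconv_congr _ (pvPw k 8) _ (pvPw k 8) m (fun i _ => h8 i) (fun i _ => h8 i)]
    exact pvPw_merge k 8 8 m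
  have hr1 : ∀ m : ℕ, pvEconv pvDelta (fun x => pvEconv (pvGl k) (pvGl k) x) m = pvPw k 2 m := by
    intro m
    rw [pvEconv_congr _ (pvPw k 0) _ (pvPw k 2) m (fun i _ => congrFun hδ i) (fun i _ => h2 i)]
    exact pvPw_merge k 0 2 m
  have hr2 : ∀ m : ℕ, pvEconv
      (fun x => pvEconv pvDelta (fun y => pvEconv (pvGl k) (pvGl k) y) x)
      (fun x => pvEconv (fun y => pvEconv (fun z => pvEconv (pvGl k) (pvGl k) z) (fun z => pvEconv (pvGl k) (pvGl k) z) y)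
        (fun y => pvEconv (fun z => pvEconv (pvGl k) (pvGl k) z) (fun z => pvEconv (pvGl k) (pvGl k) z) y) x) m
      = pvPw k 10 m := by
    intro m
    rw [pvEconv_congr _ (pvPw k 2) _ (pvPw k 8) m (fun i _ => hr1 i) (fun i _ => h8 i)]
    exact pvPw_merge k 2 8 m
  have hr3 : ∀ m : ℕ, pvEconv
      (fun w => pvEconv
        (fun x => pvEconv pvDelta (fun y => pvEconv (pvGl k) (pvGl k) y) x)
        (fun x => pvEconv (fun y => pvEconv (fun z => pvEconv (pvGl k) (pvGl k) z) (fun z => pvEconv (pvGl k) (pvGl k) z) y)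
          (fun y => pvEconv (fun z => pvEconv (pvGl k) (pvGl k) z) (fun z => pvEconv (pvGl k) (pvGl k) z) y) x) w)
      (fun w => pvEconv
        (fun x => pvEconv (fun y => pvEconv (fun z => pvEconv (pvGl k) (pvGl k) z) (fun z => pvEconv (pvGl k) (pvGl k) z) y)
          (fun y => pvEconv (fun z => pvEconv (pvGl k) (pvGl k) z) (fun z => pvEconv (pvGl k) (pvGl k) z) y) x)
        (fun x => pvEconv (fun y => pvEconv (fun z => pvEconv (pvGl k) (pvGl k) z) (fun z => pvEconv (pvGl k) (pvGl k) z) y)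
          (fun y => pvEconv (fun z => pvEconv (pvGl k) (pvGl k) z) (fun z => pvEconv (pvGl k) (pvGl k) z) y) x) w) m
      = pvPw k 26 m := by
    intro m
    rw [pvEconv_congr _ (pvPw k 10) _ (pvPw k 16) m (fun i _ => hr2 i) (fun i _ => h16 i)]
    exact pvPw_merge k 10 16 m
  rw [pvVec_pyGetD n.toNat _ n (by omega) le_rfl]
  congr 1
  exact hr3 n.toNat

theorem keyboard_spec_aux (k n : Int) (hn : 1 ≤ n) : keyboard k n = keyboard_alt k n := by
  rw [pvKeyboard_eq k n hn, pvKeyboardAlt_eq k n hn]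

-- ===== VERDICT (by name: the statement is the Claim_ definition above) =====
theorem keyboard_spec : Claim_equal_keyboard := by
  intro k n _ hn
  unfold Spec_keyboard
  exact keyboard_spec_aux k n hn
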